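-- pv_equiv track=rewrite | github.com/archlinux/contrib | package/cleanup-list.py | what_requires
-- ===== SOURCE A (Python) =====
-- def what_requires(pkgs, pkgname):
--     deptypes = ("depends", "makedepends", "checkdepends")
--     required_by = set()
--
--     for pkg in pkgs:
--         for deptype in deptypes:
--             if pkgname in pkgs[pkg][deptype]:
--                 required_by.add(pkg)
--
--     return required_by
-- ===== SOURCE B (Python) =====
-- def what_requires(pkgs, pkgname):
--     # Build a full reverse-dependency index in one pass, then answer the
--     # single query with one lookup.
--     index = {}
--     for pkg, entry in pkgs.items():
--         for deptype in ("depends", "makedepends", "checkdepends"):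
--             for dep in entry[deptype]:
--                 index.setdefault(dep, set()).add(pkg)
--     return index.get(pkgname, set())
-- ===== Notes on version B (the rewrite author's own statement) =====
-- stated objective: alternative
-- what changed: B builds a reverse-dependency index (dep name -> set of packages) by iterating over the elements of every dependency list and then answers with a single dict lookup, instead of A's per-package membership test of pkgname in each of the three lists. Pre_ excludes packages whose dict lacks one of the three deptype keys (A raises KeyError there) and assoc lists with duplicate outer or inner keys, which are not realizable Python dicts.
import Mathlib
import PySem

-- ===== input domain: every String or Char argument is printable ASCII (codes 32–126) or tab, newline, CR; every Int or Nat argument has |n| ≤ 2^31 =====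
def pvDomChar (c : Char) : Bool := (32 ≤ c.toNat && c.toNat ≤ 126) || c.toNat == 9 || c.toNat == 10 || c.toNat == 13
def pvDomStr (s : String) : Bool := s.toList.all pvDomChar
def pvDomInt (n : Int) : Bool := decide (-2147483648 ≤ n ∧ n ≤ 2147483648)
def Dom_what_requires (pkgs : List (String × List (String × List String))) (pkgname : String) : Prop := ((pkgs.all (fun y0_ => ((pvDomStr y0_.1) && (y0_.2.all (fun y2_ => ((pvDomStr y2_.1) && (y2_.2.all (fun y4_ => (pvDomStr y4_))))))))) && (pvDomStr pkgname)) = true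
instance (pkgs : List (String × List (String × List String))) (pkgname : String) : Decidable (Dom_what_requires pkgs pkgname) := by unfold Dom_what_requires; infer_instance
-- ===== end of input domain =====

-- B builds a reverse-dependency index (dep -> set of packages) in one pass and answers
-- with a single lookup, instead of A's per-package membership tests; alternative, same cost.


-- ===== PORT A =====
-- first-match association-list lookup (Python dict subscript under the assoc-list convention)
def pvGet {α : Type} (d : List (String × α)) (k : String) : Option α :=
  (d.find? (fun p => p.1 == k)).map (·.2)

-- 'for pkg in pkgs' iterates the distinct dict keys in insertion order (PySem.Set.ofList)
def what_requires (pkgs : List (String × List (String × List String))) (pkgname : String) : List String :=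
  (PySem.Set.ofList (pkgs.map (·.1))).foldl (fun required_by pkg =>
    ["depends", "makedepends", "checkdepends"].foldl (fun required_by deptype =>
      match pvGet pkgs pkg with
      | some entry =>
        match pvGet entry deptype with
        | some deps => if pkgname ∈ deps then PySem.Set.add required_by pkg else required_by
        | none => required_by          -- KeyError in Python: excluded by Pre_
      | none => required_by) required_by) []

-- ===== PORT B =====
def what_requires_alt (pkgs : List (String × List (String × List String))) (pkgname : String) : List String :=
  let index : PySem.Dict String (List String) :=
    pkgs.foldl (fun index p =>
      ["depends", "makedepends", "checkdepends"].foldl (fun index deptype =>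
        match pvGet p.2 deptype with
        | some deps =>
          -- index.setdefault(dep, set()).add(pkg)
          deps.foldl (fun index dep =>
            index.modify dep [] (fun s => PySem.Set.add s p.1)) index
        | none => index)               -- KeyError in Python: excluded by Pre_
      index) PySem.Dict.empty
  index.getD pkgname []

-- ===== PRECONDITION & SPEC =====
-- Pre_ excludes assoc lists with duplicate package keys or duplicate deptype keys (a Python
-- dict cannot hold them; the assoc-list reading there is accidental) and packages whose dict
-- lacks one of the three deptype keys, on which A raises KeyError.
def Pre_what_requires (pkgs : List (String × List (String × List String))) (pkgname : String) : Prop :=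
  (pkgs.map (·.1)).Nodup ∧
  ∀ p ∈ pkgs, (p.2.map (·.1)).Nodup ∧
    "depends" ∈ p.2.map (·.1) ∧ "makedepends" ∈ p.2.map (·.1) ∧ "checkdepends" ∈ p.2.map (·.1)
instance (pkgs : List (String × List (String × List String))) (pkgname : String) : Decidable (Pre_what_requires pkgs pkgname) := by unfold Pre_what_requires; infer_instance

def pvWitness_what_requires : (List (String × List (String × List String))) × String :=
  ([("a", [("depends", ["x"]), ("makedepends", []), ("checkdepends", [])]),
    ("b", [("depends", []), ("makedepends", ["x"]), ("checkdepends", [])])], "x")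

def Spec_what_requires (pkgs : List (String × List (String × List String))) (pkgname : String) (out : List String) : Prop := out = what_requires_alt pkgs pkgname
instance (pkgs : List (String × List (String × List String))) (pkgname : String) (out : List String) : Decidable (Spec_what_requires pkgs pkgname out) := by unfold Spec_what_requires; infer_instance

-- ===== CLAIM (what is proved, stated in full; the proofs are below) =====
def Claim_equal_what_requires : Prop := ∀ (pkgs : List (String × List (String × List String))) (pkgname : String), Dom_what_requires pkgs pkgname → Pre_what_requires pkgs pkgname → Spec_what_requires pkgs pkgname (what_requires pkgs pkgname)

-- ===== LEMMAS AND PROOFS =====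

-- entry of the index at pkgname after folding one dependency list
theorem pv_fold_deps (deps : List String) (idx : PySem.Dict String (List String))
    (pkg pkgname : String) :
    (deps.foldl (fun index dep => index.modify dep [] (fun s => PySem.Set.add s pkg)) idx).getD pkgname []
      = if pkgname ∈ deps then PySem.Set.add (idx.getD pkgname []) pkg else idx.getD pkgname [] := by
  induction deps generalizing idx with
  | nil => simp
  | cons d rest ih =>
    simp only [List.foldl_cons, ih, List.mem_cons]
    rw [PySem.Dict.getD_modify]
    by_cases hd : pkgname = d
    · subst hd
      split_ifs <;> simp_all
    · simp [hd]

-- A's per-package body, on the set accumulator directly (used only by the proofs)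
def pvStepA (pkgname : String) (req : List String) (pkg : String)
    (entry : List (String × List String)) : List String :=
  ["depends", "makedepends", "checkdepends"].foldl (fun req deptype =>
    match pvGet entry deptype with
    | some deps => if pkgname ∈ deps then PySem.Set.add req pkg else req
    | none => req) req

theorem pv_foldl_add (xs : List String) (acc : List String) (h : (acc ++ xs).Nodup) :
    xs.foldl PySem.Set.add acc = acc ++ xs := by
  induction xs generalizing acc with
  | nil => simp
  | cons x rest ih =>
    have hx : x ∉ acc := by
      intro hmem
      exact (List.disjoint_of_nodup_append h hmem) (by simp)
    have hadd : PySem.Set.add acc x = acc ++ [x] := by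
      simp [PySem.Set.add, PySem.Set.contains, hx]
    rw [List.foldl_cons, hadd, ih (acc ++ [x]) (by simpa using h)]
    simp

theorem pv_ofList_nodup (xs : List String) (h : xs.Nodup) : PySem.Set.ofList xs = xs := by
  have := pv_foldl_add xs [] (by simpa using h)
  simpa [PySem.Set.ofList_eq_foldl] using this

theorem pv_find_nodup {α : Type} (pkgs : List (String × α)) (p : String × α)
    (h : (pkgs.map (·.1)).Nodup) (hp : p ∈ pkgs) : pvGet pkgs p.1 = some p.2 := by
  induction pkgs with
  | nil => cases hp
  | cons q rest ih =>
    rcases List.mem_cons.mp hp with rfl | hp'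
    · simp [pvGet]
    · have hne : q.1 ≠ p.1 := by
        intro he
        have : p.1 ∈ rest.map (·.1) := List.mem_map.mpr ⟨p, hp', rfl⟩
        rw [List.map_cons, List.nodup_cons] at h
        exact h.1 (he ▸ this)
      have h' : (rest.map (·.1)).Nodup := by
        rw [List.map_cons, List.nodup_cons] at h; exact h.2
      simp only [pvGet, List.find?_cons]
      rw [show (q.1 == p.1) = false from beq_eq_false_iff_ne.mpr hne]
      exact ih h' hp'

theorem pv_A_fold (pkgname : String) (whole : List (String × List (String × List String)))
    (pkgs : List (String × List (String × List String))) (req : List String)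
    (h : ∀ p ∈ pkgs, pvGet whole p.1 = some p.2) :
    (pkgs.map (·.1)).foldl (fun required_by pkg =>
      ["depends", "makedepends", "checkdepends"].foldl (fun required_by deptype =>
        match pvGet whole pkg with
        | some entry =>
          match pvGet entry deptype with
          | some deps => if pkgname ∈ deps then PySem.Set.add required_by pkg else required_by
          | none => required_by
        | none => required_by) required_by) req
      = pkgs.foldl (fun req p => pvStepA pkgname req p.1 p.2) req := by
  induction pkgs generalizing req with
  | nil => rfl
  | cons a rest ih =>
    have hh : pvGet whole a.1 = some a.2 := h a (List.mem_cons_self ..)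
    have ih' := ih (pvStepA pkgname req a.1 a.2) (fun p hp => h p (List.mem_cons_of_mem _ hp))
    simp only [List.map_cons, List.foldl_cons, List.foldl_nil, hh, pvStepA] at ih' ⊢
    exact ih'

-- entry of the index at pkgname after one deptype of one package
theorem pv_step1 (pkgname pkg : String) (entry : List (String × List String))
    (dt : String) (idx : PySem.Dict String (List String)) :
    (match pvGet entry dt with
     | some deps => deps.foldl (fun index dep =>
         PySem.Dict.modify index dep [] (fun s => PySem.Set.add s pkg)) idx
     | none => idx).getD pkgname []
    = (match pvGet entry dt with
       | some deps => if pkgname ∈ deps then PySem.Set.add (idx.getD pkgname []) pkg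
                      else idx.getD pkgname []
       | none => idx.getD pkgname []) := by
  cases pvGet entry dt <;> simp [pv_fold_deps]

theorem pv_perpkg (pkgname : String) (p : String × List (String × List String))
    (idx : PySem.Dict String (List String)) :
    (["depends", "makedepends", "checkdepends"].foldl (fun index deptype =>
      match pvGet p.2 deptype with
      | some deps => deps.foldl (fun index dep =>
          PySem.Dict.modify index dep [] (fun s => PySem.Set.add s p.1)) index
      | none => index) idx).getD pkgname []
    = pvStepA pkgname (idx.getD pkgname []) p.1 p.2 := by
  simp only [List.foldl_cons, List.foldl_nil, pvStepA]
  rw [pv_step1, pv_step1, pv_step1]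

theorem pv_B_inv (pkgname : String) (pkgs : List (String × List (String × List String)))
    (idx : PySem.Dict String (List String)) :
    (pkgs.foldl (fun index p =>
      ["depends", "makedepends", "checkdepends"].foldl (fun index deptype =>
        match pvGet p.2 deptype with
        | some deps => deps.foldl (fun index dep =>
            PySem.Dict.modify index dep [] (fun s => PySem.Set.add s p.1)) index
        | none => index) index) idx).getD pkgname []
    = pkgs.foldl (fun req p => pvStepA pkgname req p.1 p.2) (idx.getD pkgname []) := by
  induction pkgs generalizing idx with
  | nil => rfl
  | cons a rest ih =>
    rw [List.foldl_cons, ih, pv_perpkg, List.foldl_cons]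

-- ===== VERDICT (by name: the statement is the Claim_ definition above) =====
theorem what_requires_spec : Claim_equal_what_requires := by
  intro pkgs pkgname _ hpre
  obtain ⟨hnodup, -⟩ := hpre
  unfold Spec_what_requires what_requires what_requires_alt
  rw [pv_ofList_nodup _ hnodup, pv_A_fold pkgname pkgs pkgs []
    (fun p hp => pv_find_nodup pkgs p hnodup hp), pv_B_inv]
  simp
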